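-- pv_equiv track=rewrite | github.com/eliottcassidy2000/math | 04-computation/perm_det_23.py | pfaffian_even
-- ===== SOURCE A (Python) =====
-- def pfaffian_even(S, n):
--     """Compute Pfaffian for even-dimensional skew-symmetric matrix."""
--     if n % 2 == 1:
--         return 0
--     if n == 0:
--         return 1
--     if n == 2:
--         return S[0][1]
--
--     # Expansion along first row
--     total = 0
--     for j in range(1, n):
--         if S[0][j] == 0:
--             continue
--         # Remove rows/cols 0 and j
--         indices = [i for i in range(n) if i != 0 and i != j]
--         sub = [[S[a][b] for b in indices] for a in indices]
--         sign = (-1) ** (j - 1)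
--         total += sign * S[0][j] * pfaffian_even(sub, n - 2)
--     return total
-- ===== SOURCE B (Python) =====
-- def pfaffian_even(S, n):
--     """Compute Pfaffian for even-dimensional skew-symmetric matrix.
--
--     Iterative worklist version: instead of recursing, keep an explicit stack of
--     (coefficient, matrix, size) jobs and accumulate the grand total directly.
--     """
--     if n % 2 == 1:
--         return 0
--     total = 0
--     stack = [(1, S, n)]
--     while stack:
--         c, M, m = stack.pop()
--         if m == 0:
--             total += c
--         elif m == 2:
--             total += c * M[0][1]
--         else:
--             for j in range(1, m):
--                 v = M[0][j]
--                 if v: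
--                     indices = [i for i in range(m) if i != 0 and i != j]
--                     sub = [[M[a][b] for b in indices] for a in indices]
--                     stack.append((c * (-1) ** (j - 1) * v, sub, m - 2))
--     return total
-- ===== Notes on version B (the rewrite author's own statement) =====
-- stated objective: alternative
-- what changed: The naive recursion over submatrices is replaced by an iterative worklist machine: an explicit stack of (coefficient, matrix, size) jobs with one accumulated total, no recursion and no per-call partial sums.
import Mathlib
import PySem

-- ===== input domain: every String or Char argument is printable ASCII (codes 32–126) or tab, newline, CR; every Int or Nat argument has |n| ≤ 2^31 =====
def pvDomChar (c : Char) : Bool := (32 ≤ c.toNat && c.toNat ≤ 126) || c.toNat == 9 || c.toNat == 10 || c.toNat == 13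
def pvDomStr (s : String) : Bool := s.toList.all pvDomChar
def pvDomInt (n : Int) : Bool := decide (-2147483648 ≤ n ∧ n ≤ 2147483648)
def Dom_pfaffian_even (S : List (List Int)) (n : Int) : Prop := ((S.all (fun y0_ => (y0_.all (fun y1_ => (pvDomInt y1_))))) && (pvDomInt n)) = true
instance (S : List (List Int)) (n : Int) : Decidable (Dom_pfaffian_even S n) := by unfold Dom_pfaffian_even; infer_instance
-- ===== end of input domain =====

-- B replaces A's naive recursion by an explicit worklist (stack of coefficient×matrix×size jobs); same expansion, iterative decomposition.

-- ===== PORT A =====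
-- M[a][b] (both indices are in range on every admitted input; default 0 is never used under Pre_)
def pvEntry (M : List (List Int)) (a b : Int) : Int :=
  PySem.List.pyGetD (PySem.List.pyGetD M a []) b 0

-- indices = [i for i in range(m) if i != 0 and i != j]; sub = [[M[a][b] for b in indices] for a in indices]
def pvSub (M : List (List Int)) (m j : Int) : List (List Int) :=
  let indices := (PySem.List.pyRange 0 m 1).filter (fun i => !(i == 0) && !(i == j))
  indices.map (fun a => indices.map (fun b => pvEntry M a b))

theorem pvPfDec (n j : Int) (hj : j ∈ PySem.List.pyRange 1 n 1) :
    (n - 2).toNat < n.toNat := by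
  obtain ⟨h1, h2⟩ := PySem.List.mem_pyRange_one.mp hj
  have hn : 0 < n := by omega
  exact (Int.toNat_lt_toNat hn).mpr (by omega)

def pfaffian_even (S : List (List Int)) (n : Int) : Int :=
  if h1 : PySem.Int.mod n 2 = 1 then 0
  else if h2 : n = 0 then 1
  else if h3 : n = 2 then pvEntry S 0 1
  else
    (PySem.List.pyRange 1 n 1).attach.foldl
      (fun total j =>
        if pvEntry S 0 j.1 = 0 then total
        else total + (-1 : Int) ^ (j.1 - 1).toNat * pvEntry S 0 j.1 *
              pfaffian_even (pvSub S n j.1) (n - 2))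
      0
termination_by n.toNat
decreasing_by
  exact pvPfDec n j.1 j.2

-- ===== PORT B =====
-- termination measure for the worklist: a job of size m can spawn at most (m-1) jobs of size m-2
def pvG : Nat → Nat
  | 0 => 1
  | 1 => 1
  | 2 => 1
  | (k+3) => (k+3) * pvG (k+1) + 1

def pvMeasure (stack : List (Int × List (List Int) × Int)) : Nat :=
  (stack.map (fun t => pvG t.2.2.toNat)).sum

theorem pvG_pos (k : Nat) : 1 ≤ pvG k := by
  match k with
  | 0 => exact Nat.le_refl 1
  | 1 => exact Nat.le_refl 1
  | 2 => exact Nat.le_refl 1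
  | (d+3) => rw [pvG]; exact Nat.le_add_left 1 _

theorem pvMeasure_cons (x : Int × List (List Int) × Int) (xs : List (Int × List (List Int) × Int)) :
    pvMeasure (x :: xs) = pvG x.2.2.toNat + pvMeasure xs := by
  simp [pvMeasure]

theorem pvMeasure_foldl_le {α : Type} (f : List (Int × List (List Int) × Int) → α → List (Int × List (List Int) × Int))
    (B : Nat) (hf : ∀ st j, pvMeasure (f st j) ≤ pvMeasure st + B) :
    ∀ (L : List α) (st : List (Int × List (List Int) × Int)),
      pvMeasure (L.foldl f st) ≤ pvMeasure st + L.length * B := by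
  intro L
  induction L with
  | nil => intro st; simp
  | cons x xs ih =>
    intro st
    simp only [List.foldl_cons, List.length_cons]
    calc pvMeasure (xs.foldl f (f st x)) ≤ pvMeasure (f st x) + xs.length * B := ih _
      _ ≤ (pvMeasure st + B) + xs.length * B := Nat.add_le_add_right (hf st x) _
      _ = pvMeasure st + (xs.length + 1) * B := by rw [Nat.succ_mul]; omega

theorem pvG_step (k : Nat) (h : 3 ≤ k) : (k - 1) * pvG (k - 2) < pvG k := by
  obtain ⟨d, rfl⟩ := Nat.exists_eq_add_of_le' h
  show (d + 2) * pvG (d + 1) < pvG (d + 3)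
  rw [pvG]
  exact Nat.lt_succ_of_le (Nat.mul_le_mul_right _ (Nat.le_succ (d + 2)))

theorem pvG_step_int (m : Int) (hm : 3 ≤ m) :
    (m - 1).toNat * pvG (m - 2).toNat < pvG m.toNat := by
  obtain ⟨K, hK⟩ : ∃ K : Nat, m = (K : Int) := ⟨m.toNat, (Int.toNat_of_nonneg (by omega)).symm⟩
  subst hK
  have e1 : ((K : Int) - 1).toNat = K - 1 := by exact_mod_cast Int.toNat_sub K 1
  have e2 : ((K : Int) - 2).toNat = K - 2 := by exact_mod_cast Int.toNat_sub K 2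
  rw [e1, e2, Int.toNat_natCast]
  exact pvG_step K (by exact_mod_cast hm)

theorem pvMeasure_core (m : Int) (A R : Nat) (_hm0 : ¬ m = 0) (hm2 : ¬ m = 2)
    (hfold : A ≤ R + (m - 1).toNat * pvG (m - 2).toNat) : A < pvG m.toNat + R := by
  by_cases hm : 3 ≤ m
  · calc A ≤ R + (m - 1).toNat * pvG (m - 2).toNat := hfold
      _ < R + pvG m.toNat := Nat.add_lt_add_left (pvG_step_int m hm) R
      _ = pvG m.toNat + R := Nat.add_comm R _
  · have h1 : m - 1 ≤ 0 := by omega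
    rw [Int.toNat_of_nonpos h1, Nat.zero_mul, Nat.add_zero] at hfold
    have h2 := pvG_pos m.toNat
    omega

theorem pvMeasure_push_lt (c : Int) (M : List (List Int)) (m : Int)
    (rest : List (Int × List (List Int) × Int)) (hm0 : ¬ m = 0) (hm2 : ¬ m = 2) :
    pvMeasure
      ((PySem.List.pyRange 1 m 1).foldl
        (fun st j =>
          if pvEntry M 0 j = 0 then st
          else (c * (-1 : Int) ^ (j - 1).toNat * pvEntry M 0 j, pvSub M m j, m - 2) :: st)
        rest) < pvMeasure ((c, M, m) :: rest) := by
  have hb : ∀ st j, pvMeasure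
      ((fun st (j : Int) =>
        if pvEntry M 0 j = 0 then st
        else (c * (-1 : Int) ^ (j - 1).toNat * pvEntry M 0 j, pvSub M m j, m - 2) :: st) st j)
      ≤ pvMeasure st + pvG (m - 2).toNat := by
    intro st j
    by_cases hv : pvEntry M 0 j = 0
    · simp [hv]
    · simp only [hv, if_false]
      rw [pvMeasure_cons]
      exact Nat.le_of_eq (Nat.add_comm _ _)
  have hfold := pvMeasure_foldl_le _ _ hb (PySem.List.pyRange 1 m 1) rest
  rw [PySem.List.length_pyRange_one] at hfold
  rw [pvMeasure_cons]
  exact pvMeasure_core m _ _ hm0 hm2 hfold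

-- the 'while stack:' loop. The Lean list mirrors the Python stack with its TOP AT THE HEAD
-- (Python appends/pops at the end; here push = cons and pop = head, the same LIFO order:
-- jobs pushed for ascending j are popped for descending j in both).
def pfMachine : List (Int × List (List Int) × Int) → Int → Int
  | [], total => total
  | (c, M, m) :: rest, total =>
    if m = 0 then pfMachine rest (total + c)
    else if m = 2 then pfMachine rest (total + c * pvEntry M 0 1)
    else pfMachine
      ((PySem.List.pyRange 1 m 1).foldl
        (fun st j =>
          if pvEntry M 0 j = 0 then st
          else (c * (-1 : Int) ^ (j - 1).toNat * pvEntry M 0 j, pvSub M m j, m - 2) :: st)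
        rest)
      total
termination_by stack _ => pvMeasure stack
decreasing_by
  · simp only [pvMeasure_cons]
    have := pvG_pos m.toNat
    omega
  · simp only [pvMeasure_cons]
    have := pvG_pos m.toNat
    omega
  · simp only [dite_eq_ite]
    exact pvMeasure_push_lt c M m rest (by assumption) (by assumption)

def pfaffian_even_alt (S : List (List Int)) (n : Int) : Int :=
  if PySem.Int.mod n 2 = 1 then 0
  else pfMachine [(1, S, n)] 0

-- ===== PRECONDITION & SPEC =====
-- Pre_ excludes exactly the inputs on which the Python A raises IndexError: n ≥ 2 with a
-- missing row/entry in the leading n×n block (for n = 2 only row 0 with ≥ 2 entries is needed).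
def Pre_pfaffian_even (S : List (List Int)) (n : Int) : Prop :=
  PySem.Int.mod n 2 = 1 ∨ n ≤ 0 ∨
  (n = 2 ∧ 1 ≤ (S.length : Int) ∧ 2 ≤ ((S.headD []).length : Int)) ∨
  ((n : Int) ≤ S.length ∧ ∀ r ∈ S.take n.toNat, (n : Int) ≤ r.length)
instance (S : List (List Int)) (n : Int) : Decidable (Pre_pfaffian_even S n) := by
  unfold Pre_pfaffian_even; infer_instance

def pvWitness_pfaffian_even : List (List Int) × Int := ([[0, 1], [-1, 0]], 2)

def Spec_pfaffian_even (S : List (List Int)) (n : Int) (out : Int) : Prop := out = pfaffian_even_alt S n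
instance (S : List (List Int)) (n : Int) (out : Int) : Decidable (Spec_pfaffian_even S n out) := by unfold Spec_pfaffian_even; infer_instance

-- ===== CLAIM (what is proved, stated in full; the proofs are below) =====
def Claim_equal_pfaffian_even : Prop := ∀ (S : List (List Int)) (n : Int), Dom_pfaffian_even S n → Pre_pfaffian_even S n → Spec_pfaffian_even S n (pfaffian_even S n)

-- ===== LEMMAS AND PROOFS =====

theorem pfA_zero (M : List (List Int)) : pfaffian_even M 0 = 1 := by
  rw [pfaffian_even]
  norm_num [PySem.Int.mod]

theorem pfA_two (M : List (List Int)) : pfaffian_even M 2 = pvEntry M 0 1 := by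
  rw [pfaffian_even]
  norm_num [PySem.Int.mod]

theorem pvAttachSum (l : List Int) (g : Int → Int) :
    ((l.attach.map fun (j : {x // x ∈ l}) => g j.1).sum : Int) = (l.map g).sum := by
  congr 1
  exact List.attach_map_val

theorem pfA_expand (S : List (List Int)) (n : Int) (h1 : PySem.Int.mod n 2 ≠ 1)
    (h2 : n ≠ 0) (h3 : n ≠ 2) :
    pfaffian_even S n =
      ((PySem.List.pyRange 1 n 1).map (fun j =>
        if pvEntry S 0 j = 0 then 0
        else (-1 : Int) ^ (j - 1).toNat * pvEntry S 0 j * pfaffian_even (pvSub S n j) (n - 2))).sum := by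
  rw [pfaffian_even, dif_neg h1, dif_neg h2, dif_neg h3]
  have hbody : (fun (total : Int) (j : {x // x ∈ PySem.List.pyRange 1 n 1}) =>
      if pvEntry S 0 j.1 = 0 then total
      else total + (-1 : Int) ^ (j.1 - 1).toNat * pvEntry S 0 j.1 * pfaffian_even (pvSub S n j.1) (n - 2))
      = (fun (total : Int) (j : {x // x ∈ PySem.List.pyRange 1 n 1}) => total +
          (if pvEntry S 0 j.1 = 0 then 0
           else (-1 : Int) ^ (j.1 - 1).toNat * pvEntry S 0 j.1 * pfaffian_even (pvSub S n j.1) (n - 2))) := by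
    funext total j
    split_ifs <;> ring
  rw [hbody, PySem.List.foldl_add, zero_add]
  exact pvAttachSum (PySem.List.pyRange 1 n 1) (fun j =>
    if pvEntry S 0 j = 0 then 0
    else (-1 : Int) ^ (j - 1).toNat * pvEntry S 0 j * pfaffian_even (pvSub S n j) (n - 2))

theorem pvMod2_sub2 (m : Int) (h : PySem.Int.mod m 2 ≠ 1) : PySem.Int.mod (m - 2) 2 ≠ 1 := by
  rw [PySem.Int.mod_eq_emod_of_pos (by norm_num)] at h ⊢
  omega

-- the push loop appends exactly one job per j with nonzero entry
theorem pvSumFilter (L : List Int) (p : Int → Bool) (f : Int → Int) :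
    (((L.filter p).map f).sum : Int) = (L.map fun x => if p x then f x else 0).sum := by
  induction L with
  | nil => simp
  | cons x xs ih =>
    by_cases hp : p x <;> simp [hp, ih]

theorem pvFoldPush (L : List Int) (v : Int → Int) (item : Int → Int × List (List Int) × Int) :
    ∀ st : List (Int × List (List Int) × Int),
      (L.foldl (fun st j => if v j = 0 then st else item j :: st) st)
        = ((L.filter (fun j => !(v j == 0))).map item).reverse ++ st := by
  induction L with
  | nil => intro st; simp
  | cons x xs ih =>
    intro st
    by_cases hv : v x = 0 <;> simp [hv, ih, List.append_assoc]

theorem pfMachine_inv : ∀ (stack : List (Int × List (List Int) × Int)) (total : Int),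
    (∀ t ∈ stack, PySem.Int.mod t.2.2 2 ≠ 1) →
    pfMachine stack total = total + (stack.map (fun t => t.1 * pfaffian_even t.2.1 t.2.2)).sum := by
  intro stack total
  induction stack, total using pfMachine.induct with
  | case1 total => simp [pfMachine]
  | case2 c M rest total ih =>
    intro heven
    rw [pfMachine]
    norm_num
    rw [ih (fun t ht => heven t (List.mem_cons_of_mem _ ht))]
    simp [pfA_zero]
    ring
  | case3 c M rest total h2 ih =>
    intro heven
    rw [pfMachine]
    norm_num
    rw [ih (fun t ht => heven t (List.mem_cons_of_mem _ ht))]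
    simp [pfA_two]
    ring
  | case4 c M m rest total hm0 hm2 ih =>
    intro heven
    have hlast : PySem.Int.mod m 2 ≠ 1 := heven (c, M, m) List.mem_cons_self
    rw [pfMachine, if_neg hm0, if_neg hm2]
    simp only [dite_eq_ite] at ih
    rw [pvFoldPush] at ih
    rw [pvFoldPush, ih]
    · rw [List.map_append, List.sum_append, List.map_reverse, List.sum_reverse, List.map_map]
      simp only [List.map_cons, List.sum_cons]
      rw [pfA_expand M m hlast hm0 hm2]
      rw [pvSumFilter]
      rw [← List.sum_map_mul_left]
      have : (List.map
          (fun x => if (!pvEntry M 0 x == 0) = true then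
              ((fun t => t.1 * pfaffian_even t.2.1 t.2.2) ∘ fun j =>
                (c * (-1 : Int) ^ (j - 1).toNat * pvEntry M 0 j, pvSub M m j, m - 2)) x
            else 0)
          (PySem.List.pyRange 1 m 1))
          = (List.map
          (fun b => c * if pvEntry M 0 b = 0 then 0
              else (-1 : Int) ^ (b - 1).toNat * pvEntry M 0 b * pfaffian_even (pvSub M m b) (m - 2))
          (PySem.List.pyRange 1 m 1)) := by
        refine List.map_congr_left fun j _ => ?_
        by_cases hv : pvEntry M 0 j = 0 <;> simp [Function.comp, hv, mul_comm, mul_left_comm]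
      rw [this]
    · intro x hx
      rcases List.mem_append.mp hx with hx | hx
      · rcases List.mem_reverse.mp hx |> List.mem_map.mp with ⟨j, _, rfl⟩
        exact pvMod2_sub2 _ hlast
      · exact heven x (List.mem_cons_of_mem _ hx)

-- ===== VERDICT (by name: the statement is the Claim_ definition above) =====
theorem pfaffian_even_spec : Claim_equal_pfaffian_even := by
  intro S n _ _
  unfold Spec_pfaffian_even pfaffian_even_alt
  by_cases h1 : PySem.Int.mod n 2 = 1
  · rw [if_pos h1, pfaffian_even, dif_pos h1]
  · rw [if_neg h1]
    rw [pfMachine_inv [(1, S, n)] 0 (by intro t ht; simp at ht; subst ht; exact h1)]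
    simp
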